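-- pv_equiv track=rewrite | github.com/kaetze66/tb_pysd | tb/descriptives.py | add_builtin
-- ===== SOURCE A (Python) =====
-- def add_builtin(varlist, builtin, model_name):
--     """
--     this adds the builtin information to the variables for statistical purposes
--
--     :param varlist: list of dicts with variables
--     :param builtin: list with builtins
--     :param model_name: str with model name
--     :return: list of dicts with builtin information added
--     """
--
--     # bunit: base unit is interesting when other time units are in the model
--     # SAVEPER is irrelevant and thus ignored
--     ftime, bunit, itime, tstep = '', '', '', ''
--     for item in builtin:
--         if item['name'] == 'FINAL TIME':
--             ftime = item['expr']
--             bunit = item['unit']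
--         elif item['name'] == 'INITIAL TIME':
--             itime = item['expr']
--         elif item['name'] == 'TIME STEP':
--             tstep = item['expr']
--     for var in varlist:
--         var['FINAL TIME'] = ftime
--         var['Base Unit'] = bunit
--         var['INITIAL TIME'] = itime
--         var['TIME STEP'] = tstep
--         var['Model name'] = model_name
--     return varlist
-- ===== SOURCE B (Python) =====
-- def add_builtin(varlist, builtin, model_name):
--     # Per-key backward search: scan builtin in reverse and take the FIRST match
--     # (equals A's forward last-wins), instead of one forward scan threading four
--     # accumulators. Like A, this mutates the dicts in varlist in place.
--     def latest(name, field):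
--         return next((item[field] for item in reversed(builtin)
--                      if item['name'] == name), '')
--     updates = {
--         'FINAL TIME': latest('FINAL TIME', 'expr'),
--         'Base Unit': latest('FINAL TIME', 'unit'),
--         'INITIAL TIME': latest('INITIAL TIME', 'expr'),
--         'TIME STEP': latest('TIME STEP', 'expr'),
--         'Model name': model_name,
--     }
--     for var in varlist:
--         var.update(updates)
--     return varlist
-- ===== Notes on version B (the rewrite author's own statement) =====
-- stated objective: alternative
-- what changed: Replaces A's single forward branching scan threading four accumulator strings with four independent backward first-match searches over the builtins (reverse first-match = forward last-wins), then annotates each variable with one dict.update of a precomputed table instead of five assignments.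
import Mathlib
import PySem

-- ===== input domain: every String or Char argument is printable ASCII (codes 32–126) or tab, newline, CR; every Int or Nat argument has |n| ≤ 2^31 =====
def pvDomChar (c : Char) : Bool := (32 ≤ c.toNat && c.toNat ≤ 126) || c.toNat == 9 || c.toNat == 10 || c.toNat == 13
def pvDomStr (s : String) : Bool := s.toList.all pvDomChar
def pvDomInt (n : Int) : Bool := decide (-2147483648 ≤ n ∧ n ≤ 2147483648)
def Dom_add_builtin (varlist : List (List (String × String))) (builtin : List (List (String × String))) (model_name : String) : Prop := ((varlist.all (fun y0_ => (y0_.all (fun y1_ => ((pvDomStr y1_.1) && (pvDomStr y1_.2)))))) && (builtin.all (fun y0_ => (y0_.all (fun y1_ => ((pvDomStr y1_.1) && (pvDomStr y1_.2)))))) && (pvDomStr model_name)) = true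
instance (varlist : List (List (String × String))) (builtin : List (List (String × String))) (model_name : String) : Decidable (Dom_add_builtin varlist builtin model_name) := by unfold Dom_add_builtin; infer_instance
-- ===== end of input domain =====

-- B replaces A's forward branching scan (four accumulators threaded through one loop) with four
-- independent backward first-match searches plus one dict.update table — objective: alternative.
-- Both Pythons mutate the dicts in varlist in place; the equivalence proved is about the return value.

-- ===== PORT A =====
-- Python A raises KeyError where a needed key is missing; the port reads with getD "" there and
-- Pre_add_builtin excludes exactly those inputs.
def add_builtin (varlist : List (List (String × String))) (builtin : List (List (String × String))) (model_name : String) : List (List (String × String)) :=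
  let st := builtin.foldl (fun (st : String × String × String × String) item =>
      let d := PySem.Dict.ofList item
      if d.getD "name" "" = "FINAL TIME" then
        (d.getD "expr" "", d.getD "unit" "", st.2.2.1, st.2.2.2)
      else if d.getD "name" "" = "INITIAL TIME" then
        (st.1, st.2.1, d.getD "expr" "", st.2.2.2)
      else if d.getD "name" "" = "TIME STEP" then
        (st.1, st.2.1, st.2.2.1, d.getD "expr" "")
      else st) ("", "", "", "")
  varlist.map (fun var =>
    ((((((PySem.Dict.ofList var).insert "FINAL TIME" st.1).insert "Base Unit" st.2.1).insert
        "INITIAL TIME" st.2.2.1).insert "TIME STEP" st.2.2.2).insert "Model name" model_name).items)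

-- ===== PORT B =====
-- Source B's latest(name, field): first match in reversed(builtin), default ''
def pvLatest (builtin : List (List (String × String))) (name fld : String) : String :=
  match builtin.reverse.find? (fun it => (PySem.Dict.ofList it).getD "name" "" == name) with
  | some it => (PySem.Dict.ofList it).getD fld ""
  | none => ""

def add_builtin_alt (varlist : List (List (String × String))) (builtin : List (List (String × String))) (model_name : String) : List (List (String × String)) :=
  let updates : List (String × String) :=
    [("FINAL TIME",   pvLatest builtin "FINAL TIME" "expr"),
     ("Base Unit",    pvLatest builtin "FINAL TIME" "unit"),
     ("INITIAL TIME", pvLatest builtin "INITIAL TIME" "expr"),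
     ("TIME STEP",    pvLatest builtin "TIME STEP" "expr"),
     ("Model name",   model_name)]
  varlist.map (fun var =>
    (updates.foldl (fun (d : PySem.Dict String String) kv => d.insert kv.1 kv.2)
      (PySem.Dict.ofList var)).items)

-- ===== PRECONDITION & SPEC =====
-- Pre_ excludes exactly the inputs on which Python A raises KeyError: a builtin item without a
-- 'name' key, or an item named FINAL TIME / INITIAL TIME / TIME STEP missing the key(s) A reads.
def Pre_add_builtin (varlist : List (List (String × String))) (builtin : List (List (String × String))) (model_name : String) : Prop :=
  ∀ item ∈ builtin,
    (PySem.Dict.ofList item).contains "name" = true ∧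
    ((PySem.Dict.ofList item).getD "name" "" = "FINAL TIME" →
      (PySem.Dict.ofList item).contains "expr" = true ∧
      (PySem.Dict.ofList item).contains "unit" = true) ∧
    (((PySem.Dict.ofList item).getD "name" "" = "INITIAL TIME" ∨
      (PySem.Dict.ofList item).getD "name" "" = "TIME STEP") →
      (PySem.Dict.ofList item).contains "expr" = true)
instance (varlist : List (List (String × String))) (builtin : List (List (String × String))) (model_name : String) : Decidable (Pre_add_builtin varlist builtin model_name) := by unfold Pre_add_builtin; infer_instance

def pvWitness_add_builtin : (List (List (String × String))) × (List (List (String × String))) × String :=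
  ([[("v", "1")]],
   [[("name", "FINAL TIME"), ("expr", "10"), ("unit", "Month")],
    [("name", "INITIAL TIME"), ("expr", "0")]],
   "m")

def Spec_add_builtin (varlist : List (List (String × String))) (builtin : List (List (String × String))) (model_name : String) (out : List (List (String × String))) : Prop := out = add_builtin_alt varlist builtin model_name
instance (varlist : List (List (String × String))) (builtin : List (List (String × String))) (model_name : String) (out : List (List (String × String))) : Decidable (Spec_add_builtin varlist builtin model_name out) := by unfold Spec_add_builtin; infer_instance

-- ===== CLAIM (what is proved, stated in full; the proofs are below) =====
def Claim_equal_add_builtin : Prop := ∀ (varlist : List (List (String × String))) (builtin : List (List (String × String))) (model_name : String), Dom_add_builtin varlist builtin model_name → Pre_add_builtin varlist builtin model_name → Spec_add_builtin varlist builtin model_name (add_builtin varlist builtin model_name)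

-- ===== LEMMAS AND PROOFS =====

lemma pvLatest_append (l : List (List (String × String))) (x : List (String × String))
    (name fld : String) :
    pvLatest (l ++ [x]) name fld =
      if (PySem.Dict.ofList x).getD "name" "" = name
      then (PySem.Dict.ofList x).getD fld "" else pvLatest l name fld := by
  simp only [pvLatest, List.reverse_append, List.reverse_singleton, List.singleton_append,
    List.find?_cons]
  by_cases h : (PySem.Dict.ofList x).getD "name" "" = name
  · simp [h]
  · rw [beq_eq_false_iff_ne.mpr h]
    simp [h]

-- A's accumulator after the scan is exactly B's four backward first-match searches
lemma st_eq_latest (builtin : List (List (String × String))) :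
    builtin.foldl (fun (st : String × String × String × String) item =>
      let d := PySem.Dict.ofList item
      if d.getD "name" "" = "FINAL TIME" then
        (d.getD "expr" "", d.getD "unit" "", st.2.2.1, st.2.2.2)
      else if d.getD "name" "" = "INITIAL TIME" then
        (st.1, st.2.1, d.getD "expr" "", st.2.2.2)
      else if d.getD "name" "" = "TIME STEP" then
        (st.1, st.2.1, st.2.2.1, d.getD "expr" "")
      else st) ("", "", "", "") =
    (pvLatest builtin "FINAL TIME" "expr",
     pvLatest builtin "FINAL TIME" "unit",
     pvLatest builtin "INITIAL TIME" "expr",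
     pvLatest builtin "TIME STEP" "expr") := by
  induction builtin using List.reverseRecOn with
  | nil => simp [pvLatest]
  | append_singleton l x ih =>
    rw [List.foldl_append, ih]
    simp only [List.foldl_cons, List.foldl_nil, pvLatest_append]
    by_cases h1 : (PySem.Dict.ofList x).getD "name" "" = "FINAL TIME"
    · simp [h1]
    · by_cases h2 : (PySem.Dict.ofList x).getD "name" "" = "INITIAL TIME"
      · simp [h2]
      · by_cases h3 : (PySem.Dict.ofList x).getD "name" "" = "TIME STEP"
        · simp [h3]
        · simp [h1, h2, h3]

-- ===== VERDICT (by name: the statement is the Claim_ definition above) =====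
theorem add_builtin_spec : Claim_equal_add_builtin := by
  intro varlist builtin model_name _ _
  unfold Spec_add_builtin add_builtin add_builtin_alt
  rw [st_eq_latest builtin]
  simp only [List.foldl_cons, List.foldl_nil]
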